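-- pv_equiv track=rewrite | github.com/HarrisonMc555/adventofcode | 2018/day18b.py | slices_of
-- ===== SOURCE A (Python) =====
-- def slices_of(enumerable, length):
--     cur = []
--     for value in enumerable:
--         cur.append(value)
--         if len(cur) == length:
--             yield cur
--             cur = []
--     if cur:
--         yield cur
-- ===== SOURCE B (Python) =====
-- def slices_of(enumerable, length):
--     it = iter(enumerable)
--     while True:
--         chunk = []
--         try:
--             for _ in range(length):
--                 chunk.append(next(it))
--         except StopIteration:
--             pass
--         if not chunk:
--             return
--         yield chunk
-- ===== Notes on version B (the rewrite author's own statement) =====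
-- stated objective: idiomatic
-- what changed: Replaces the per-element push-and-check accumulator with a pull-based decomposition: repeatedly draw up to `length` items from an explicit iterator and yield each drawn chunk, stopping when a draw comes back empty.
-- outside the precondition, e.g. on slices_of([1, 2], 0): A returns [[1, 2]], B returns []; on slices_of([1], -1): A returns [[1]], B returns []
import Mathlib
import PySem

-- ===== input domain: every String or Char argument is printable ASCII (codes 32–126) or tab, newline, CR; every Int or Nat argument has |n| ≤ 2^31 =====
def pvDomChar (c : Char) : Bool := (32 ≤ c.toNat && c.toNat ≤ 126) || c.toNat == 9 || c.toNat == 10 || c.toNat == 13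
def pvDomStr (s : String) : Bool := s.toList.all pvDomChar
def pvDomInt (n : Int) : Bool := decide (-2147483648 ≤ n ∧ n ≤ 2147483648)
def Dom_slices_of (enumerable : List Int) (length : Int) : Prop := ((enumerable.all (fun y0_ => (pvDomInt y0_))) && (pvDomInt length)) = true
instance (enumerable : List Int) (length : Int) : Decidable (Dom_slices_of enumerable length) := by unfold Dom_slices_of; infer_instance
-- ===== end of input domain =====

-- B replaces A's per-element accumulate-and-check loop by a pull-based decomposition
-- (repeatedly take the next `length` items and yield them as a chunk) — objective: idiomatic.

-- ===== PORT A =====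
-- one iteration of A's for-loop body: append value, emit cur when it reaches `length`
def stepA (length : Int) (s : List (List Int) × List Int) (value : Int) :
    List (List Int) × List Int :=
  let cur := s.2 ++ [value]
  if (cur.length : Int) = length then (s.1 ++ [cur], []) else (s.1, cur)

def slices_of (enumerable : List Int) (length : Int) : List (List Int) :=
  let s := enumerable.foldl (stepA length) ([], [])
  if s.2.isEmpty then s.1 else s.1 ++ [s.2]

-- ===== PORT B =====
-- B pulls `length` items at a time from the iterator; a drawn chunk of k+1 items is a
-- take, the remaining iterator is a drop.  k is the chunk size minus one so the
-- recursion is visibly decreasing.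
def chunkAux (k : Nat) : List Int → List (List Int)
  | [] => []
  | x :: rest => (x :: rest.take k) :: chunkAux k (rest.drop k)
termination_by xs => xs.length
decreasing_by simp only [List.length_drop, List.length_cons]; omega

def slices_of_alt (enumerable : List Int) (length : Int) : List (List Int) :=
  -- guard: B's while-loop stops immediately when length ≤ 0 draws an empty chunk
  if length ≤ 0 then [] else chunkAux (length.toNat - 1) enumerable

-- ===== PRECONDITION & SPEC =====
-- Pre_ excludes non-positive length, an unspecified corner: A's len-check never fires so A
-- accidentally yields the whole input as one chunk, while B's first draw is empty and it
-- yields nothing.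
def Pre_slices_of (enumerable : List Int) (length : Int) : Prop := 1 ≤ length
instance (enumerable : List Int) (length : Int) : Decidable (Pre_slices_of enumerable length) := by unfold Pre_slices_of; infer_instance

def pvWitness_slices_of : List Int × Int := ([1, 2, 3, 4, 5], 2)

def Spec_slices_of (enumerable : List Int) (length : Int) (out : List (List Int)) : Prop := out = slices_of_alt enumerable length
instance (enumerable : List Int) (length : Int) (out : List (List Int)) : Decidable (Spec_slices_of enumerable length out) := by unfold Spec_slices_of; infer_instance

-- ===== CLAIM (what is proved, stated in full; the proofs are below) =====
def Claim_equal_slices_of : Prop := ∀ (enumerable : List Int) (length : Int), Dom_slices_of enumerable length → Pre_slices_of enumerable length → Spec_slices_of enumerable length (slices_of enumerable length)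

-- ===== LEMMAS AND PROOFS =====

-- unfolding equations for chunkAux (well-founded recursion)
lemma chunkAux_nil (k : Nat) : chunkAux k [] = [] := by rw [chunkAux]

lemma chunkAux_cons (k : Nat) (x : Int) (rest : List Int) :
    chunkAux k (x :: rest) = (x :: rest.take k) :: chunkAux k (rest.drop k) := by
  rw [chunkAux]

-- a full chunk splits off the front of the chunking
lemma chunkAux_full (k : Nat) (ys zs : List Int) (h : ys.length = k + 1) :
    chunkAux k (ys ++ zs) = ys :: chunkAux k zs := by
  cases ys with
  | nil => simp at h
  | cons y ts =>
    simp only [List.length_cons] at h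
    have ht : ts.length = k := by omega
    rw [List.cons_append, chunkAux_cons]
    rw [List.take_append_of_le_length (by omega), List.take_of_length_le (le_of_eq ht),
      List.drop_append_of_le_length (by omega), List.drop_of_length_le (le_of_eq ht),
      List.nil_append]

-- A's loop, run from any state with a not-yet-full buffer `cur`, finishes to the
-- chunking of `cur ++ xs`, appended to the already emitted chunks.
lemma fold_eq_chunks (k : Nat) (xs : List Int) :
    ∀ (out : List (List Int)) (cur : List Int), cur.length ≤ k →
      (let s := xs.foldl (stepA ((k : Int) + 1)) (out, cur);
        if s.2.isEmpty then s.1 else s.1 ++ [s.2]) = out ++ chunkAux k (cur ++ xs) := by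
  induction xs with
  | nil =>
    intro out cur h
    cases cur with
    | nil => simp [chunkAux_nil]
    | cons c cs =>
      simp only [List.length_cons] at h
      simp only [List.append_nil, List.foldl_nil, List.isEmpty_cons, chunkAux_cons,
        List.take_of_length_le (by omega : cs.length ≤ k),
        List.drop_of_length_le (by omega : cs.length ≤ k), chunkAux_nil]
      simp
  | cons v xs ih =>
    intro out cur h
    rw [List.foldl_cons]
    by_cases hfull : cur.length = k
    · have hc : stepA ((k : Int) + 1) (out, cur) v = (out ++ [cur ++ [v]], []) := by
        simp [stepA, hfull]
      rw [hc, ih (out ++ [cur ++ [v]]) [] (by simp)]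
      have : cur ++ v :: xs = (cur ++ [v]) ++ xs := by simp
      rw [this, chunkAux_full k (cur ++ [v]) xs (by simp [hfull])]
      simp
    · have hc : stepA ((k : Int) + 1) (out, cur) v = (out, cur ++ [v]) := by
        simp only [stepA]
        simp [hfull]
      rw [hc, ih out (cur ++ [v])
        (by simp only [List.length_append, List.length_cons, List.length_nil]; omega)]
      simp

-- ===== VERDICT (by name: the statement is the Claim_ definition above) =====
theorem slices_of_spec : Claim_equal_slices_of := by
  intro enumerable length _ hpre
  unfold Spec_slices_of slices_of slices_of_alt
  have hnp : ¬ length ≤ 0 := by exact not_le.mpr (by exact_mod_cast hpre)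
  rw [if_neg hnp]
  have hk : ((length.toNat - 1 : Nat) : Int) + 1 = length := by
    have h1 : (1 : Int) ≤ length := hpre
    omega
  have := fold_eq_chunks (length.toNat - 1) enumerable [] [] (by simp)
  rw [hk] at this
  simpa using this
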